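-- pv_equiv track=rewrite | github.com/HosseinFayyazi/InterpretableCNN | Utils/GeneralUtils.py | get_core_wav_test_files
-- ===== SOURCE A (Python) =====
-- def get_core_wav_test_files(wav_lst_te_comp):
--     core_test_speakers = ['DAB0', 'WBT0', 'ELC0',
--                           'TAS1', 'WEW0', 'PAS0',
--                           'JMP0', 'LNT0', 'PKT0',
--                           'LLL0', 'TLS0', 'JLM0',
--                           'BPM0', 'KLT0', 'NLP0',
--                           'CMJ0', 'JDH0', 'MGD0',
--                           'GRT0', 'NJM0', 'DHC0',
--                           'JLN0', 'PAM0', 'MLD0']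
--     wav_lst_te_core = []
--     for i in range(len(wav_lst_te_comp)):
--         for j in range(len(core_test_speakers)):
--             if core_test_speakers[j] in wav_lst_te_comp[i]:
--                 wav_lst_te_core.append(wav_lst_te_comp[i])
--                 break
--     return wav_lst_te_core
-- ===== SOURCE B (Python) =====
-- _CORE = frozenset(
--     'DAB0 WBT0 ELC0 TAS1 WEW0 PAS0 JMP0 LNT0 PKT0 LLL0 TLS0 JLM0 '
--     'BPM0 KLT0 NLP0 CMJ0 JDH0 MGD0 GRT0 NJM0 DHC0 JLN0 PAM0 MLD0'.split())
--
--
-- def get_core_wav_test_files(wav_lst_te_comp):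
--     # All codes have length 4: slide a 4-char window over each path and test
--     # it against the hash set, one pass per path for all 24 speakers at once.
--     return [p for p in wav_lst_te_comp
--             if any(p[i:i + 4] in _CORE for i in range(len(p) - 3))]
-- ===== Notes on version B (the rewrite author's own statement) =====
-- stated objective: alternative
-- what changed: Replaces A's nested loop that rescans each path once per speaker code with a single left-to-right pass per path: since all 24 codes have length 4, B slides a 4-character window over the path and tests each window against a hash set built once by splitting one space-separated code string; one scan per path replaces up to 24.
import Mathlib
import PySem

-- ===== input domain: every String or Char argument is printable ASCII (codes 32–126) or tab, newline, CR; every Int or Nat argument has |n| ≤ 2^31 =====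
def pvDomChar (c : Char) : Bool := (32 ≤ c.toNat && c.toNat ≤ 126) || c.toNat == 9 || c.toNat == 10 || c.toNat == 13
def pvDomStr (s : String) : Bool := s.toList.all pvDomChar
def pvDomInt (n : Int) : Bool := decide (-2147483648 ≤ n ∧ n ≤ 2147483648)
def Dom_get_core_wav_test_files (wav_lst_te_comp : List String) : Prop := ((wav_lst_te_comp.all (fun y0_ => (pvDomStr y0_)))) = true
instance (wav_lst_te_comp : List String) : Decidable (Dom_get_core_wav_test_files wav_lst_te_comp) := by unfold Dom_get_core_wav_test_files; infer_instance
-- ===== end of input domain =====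

-- B replaces A's nested speaker-by-speaker substring rescans by a single pass sliding a
-- 4-char window over each path, testing the window against a hash set of the codes,
-- built once by splitting one space-separated string (objective: alternative).

-- ===== PORT A =====
def coreTestSpeakersA : List String :=
  ["DAB0", "WBT0", "ELC0", "TAS1", "WEW0", "PAS0", "JMP0", "LNT0", "PKT0",
   "LLL0", "TLS0", "JLM0", "BPM0", "KLT0", "NLP0", "CMJ0", "JDH0", "MGD0",
   "GRT0", "NJM0", "DHC0", "JLN0", "PAM0", "MLD0"]

-- inner 'for j ...: if speaker in path: append; break'
def innerLoopA (s : String) (acc : List String) : List String → List String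
  | [] => acc
  | c :: cs => if PySem.Str.isIn c s then acc ++ [s] else innerLoopA s acc cs

def get_core_wav_test_files (wav_lst_te_comp : List String) : List String :=
  (PySem.List.pyRange 0 (wav_lst_te_comp.length : Int) 1).foldl
    (fun acc i => innerLoopA (PySem.List.pyGetD wav_lst_te_comp i "") acc coreTestSpeakersA) []

-- ===== PORT B =====
def coreSetB : PySem.Set String :=
  PySem.Set.ofList (PySem.Str.split₀
    "DAB0 WBT0 ELC0 TAS1 WEW0 PAS0 JMP0 LNT0 PKT0 LLL0 TLS0 JLM0 BPM0 KLT0 NLP0 CMJ0 JDH0 MGD0 GRT0 NJM0 DHC0 JLN0 PAM0 MLD0")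

def get_core_wav_test_files_alt (wav_lst_te_comp : List String) : List String :=
  wav_lst_te_comp.filter (fun p =>
    (PySem.List.pyRange 0 ((PySem.Str.len p : Int) - 3) 1).any
      (fun i => PySem.Set.contains coreSetB (PySem.Str.slice p (some i) (some (i + 4)))))

-- ===== PRECONDITION & SPEC =====
def Spec_get_core_wav_test_files (wav_lst_te_comp : List String) (out : List String) : Prop := out = get_core_wav_test_files_alt wav_lst_te_comp
instance (wav_lst_te_comp : List String) (out : List String) : Decidable (Spec_get_core_wav_test_files wav_lst_te_comp out) := by unfold Spec_get_core_wav_test_files; infer_instance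

-- ===== CLAIM (what is proved, stated in full; the proofs are below) =====
def Claim_equal_get_core_wav_test_files : Prop := ∀ (wav_lst_te_comp : List String), Dom_get_core_wav_test_files wav_lst_te_comp → Spec_get_core_wav_test_files wav_lst_te_comp (get_core_wav_test_files wav_lst_te_comp)

-- ===== LEMMAS AND PROOFS =====

set_option maxRecDepth 4000 in
lemma coreSetB_eq : coreSetB = PySem.Set.ofList coreTestSpeakersA := by decide

lemma innerLoopA_eq_if (s : String) (acc : List String) (l : List String) :
    innerLoopA s acc l = if l.any (fun c => PySem.Str.isIn c s) then acc ++ [s] else acc := by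
  induction l with
  | nil => simp [innerLoopA]
  | cons c cs ih =>
      rw [innerLoopA, List.any_cons]
      cases h : PySem.Str.isIn c s with
      | true => simp
      | false => simp [ih]

-- the predicate B tests equals the predicate A tests, for every string
lemma keep_eq (p : String) :
    ((PySem.List.pyRange 0 ((PySem.Str.len p : Int) - 3) 1).any
      (fun i => PySem.Set.contains coreSetB (PySem.Str.slice p (some i) (some (i + 4)))))
    = coreTestSpeakersA.any (fun c => PySem.Str.isIn c p) := by
  rw [Bool.eq_iff_iff]
  simp only [List.any_eq_true]
  constructor
  · rintro ⟨i, hi, hc⟩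
    rw [PySem.List.mem_pyRange_one] at hi
    obtain ⟨hi0, _⟩ := hi
    set j : Nat := i.toNat with hj
    have hij : i = (j : Int) := by omega
    have hw : (PySem.Str.slice p (some i) (some (i + 4))).toList
        = (p.toList.drop j).take 4 := by
      rw [hij]
      have : ((j : Int) + 4) = ((j : Int) + ((4 : Nat) : Int)) := by push_cast; ring
      simp [PySem.Str.toList_slice, this, PySem.List.slice_natCast_add]
    refine ⟨PySem.Str.slice p (some i) (some (i + 4)), ?_, ?_⟩
    · have := (PySem.Set.contains_iff _ _).mp hc
      rw [coreSetB_eq] at this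
      simpa [PySem.Set.mem_ofList] using this
    · rw [PySem.Str.isIn_eq]
      rw [← PySem.Chars.exists_prefix_drop_iff_isIn]
      exact ⟨j, hw ▸ List.take_prefix _ _⟩
  · rintro ⟨c, hcmem, hcin⟩
    have hc4 : c.toList.length = 4 := by
      fin_cases hcmem <;> decide
    rw [PySem.Str.isIn_eq, ← PySem.Chars.exists_prefix_drop_iff_isIn] at hcin
    obtain ⟨j, hpre⟩ := hcin
    have hlen : j + 4 ≤ p.toList.length := by
      have h1 := hpre.length_le
      have h2 := List.length_drop (l := p.toList) (i := j)
      by_cases hjl : j ≤ p.toList.length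
      · omega
      · exfalso
        rw [List.drop_eq_nil_of_le (by omega)] at hpre
        have := hpre.length_le
        simp at this
        omega
    have hceq : c.toList = (p.toList.drop j).take 4 := by
      have := (List.prefix_iff_eq_take.mp hpre)
      rwa [hc4] at this
    refine ⟨(j : Int), ?_, ?_⟩
    · rw [PySem.List.mem_pyRange_one]
      constructor
      · positivity
      · simp only [PySem.Str.len_eq]
        omega
    · rw [PySem.Set.contains_iff]
      have hw : (PySem.Str.slice p (some (j : Int)) (some ((j : Int) + 4))).toList
          = (p.toList.drop j).take 4 := by
        have : ((j : Int) + 4) = ((j : Int) + ((4 : Nat) : Int)) := by push_cast; ring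
        simp [PySem.Str.toList_slice, this, PySem.List.slice_natCast_add]
      have : PySem.Str.slice p (some (j : Int)) (some ((j : Int) + 4)) = c := by
        apply String.toList_inj.mp
        rw [hw, hceq]
      rw [coreSetB_eq, this]
      simpa [PySem.Set.mem_ofList] using hcmem

theorem get_core_wav_test_files_spec : Claim_equal_get_core_wav_test_files := by
  intro xs _
  unfold Spec_get_core_wav_test_files get_core_wav_test_files get_core_wav_test_files_alt
  rw [PySem.List.foldl_pyRange_zero_pyGetD' xs "" (fun acc s => innerLoopA s acc coreTestSpeakersA) []]
  simp only [innerLoopA_eq_if]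
  rw [PySem.List.foldl_append_if]
  simp only [List.nil_append, List.map_id']
  apply List.filter_congr
  intro p _
  exact (keep_eq p).symm
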